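-- pv_equiv track=rewrite | github.com/sxntixgxs/FRONTEND | JAVA-SCRIPT-main/Python-carpeta/Matrices-12/precios.py | calcDiaMayorVentas
-- ===== SOURCE A (Python) =====
-- def calcDiaMayorVentas(matVentas , matPrecios):
--     fil = len(matVentas)
--     colum = len(matVentas[0])
--     lstDiaVentas = [0] * colum
--
--     for f in range(fil):
--         for c in range (colum):
--             lstDiaVentas[c] += matVentas[f][c] * matPrecios[f]
--
--     maxDiaVenta = max(lstDiaVentas)
--     posMaxDiaVentas = lstDiaVentas.index(maxDiaVenta)
--
--
--     return posMaxDiaVentas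
-- ===== SOURCE B (Python) =====
-- def calcDiaMayorVentas(matVentas, matPrecios):
--     colum = len(matVentas[0])
--
--     def colTotal(c):
--         return sum(row[c] * p for row, p in zip(matVentas, matPrecios))
--
--     bestPos = 0
--     bestVal = colTotal(0)
--     for c in range(1, colum):
--         t = colTotal(c)
--         if t > bestVal:
--             bestPos, bestVal = c, t
--     return bestPos
-- ===== Notes on version B (the rewrite author's own statement) =====
-- stated objective: alternative
-- what changed: Column-outer running-argmax: for each column compute its weighted total over a zip of rows and prices and keep a strict-greater running best, instead of accumulating a per-day totals list row-by-row and then calling max plus .index.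
import Mathlib
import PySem

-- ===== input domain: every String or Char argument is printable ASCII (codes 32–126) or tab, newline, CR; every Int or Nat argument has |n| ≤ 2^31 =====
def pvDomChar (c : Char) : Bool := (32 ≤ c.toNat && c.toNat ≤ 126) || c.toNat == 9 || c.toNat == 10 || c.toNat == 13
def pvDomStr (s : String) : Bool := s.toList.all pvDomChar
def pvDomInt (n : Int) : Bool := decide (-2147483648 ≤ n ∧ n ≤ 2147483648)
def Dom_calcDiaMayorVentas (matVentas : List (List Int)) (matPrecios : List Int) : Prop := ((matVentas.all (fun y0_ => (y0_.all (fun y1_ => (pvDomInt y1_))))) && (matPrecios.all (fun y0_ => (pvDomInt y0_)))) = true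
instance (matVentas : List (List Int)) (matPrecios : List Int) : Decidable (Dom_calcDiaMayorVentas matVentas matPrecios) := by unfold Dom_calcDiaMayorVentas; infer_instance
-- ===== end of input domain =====

-- B computes each column's weighted total directly (column-outer, over zip of rows and prices)
-- and keeps a strict-greater running best, instead of A's row-outer totals list + max + .index.


-- ===== PORT A =====
def calcDiaMayorVentas (matVentas : List (List Int)) (matPrecios : List Int) : Int :=
  let fil : Int := matVentas.length
  let colum : Int := ((PySem.List.pyGetD matVentas 0 []).length : Int)
  let lst0 : List Int := List.replicate colum.toNat 0
  let lst :=
    (PySem.List.pyRange 0 fil 1).foldl (fun lst f =>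
      (PySem.List.pyRange 0 colum 1).foldl (fun lst c =>
        PySem.List.pySetD lst c
          (PySem.List.pyGetD lst c 0 +
            PySem.List.pyGetD (PySem.List.pyGetD matVentas f []) c 0 *
              PySem.List.pyGetD matPrecios f 0)) lst) lst0
  let maxDiaVenta := (PySem.List.max? lst (fun y => y)).getD 0
  (((PySem.List.index? lst maxDiaVenta).getD 0 : Nat) : Int)

-- ===== PORT B =====
def pvColTotal (matVentas : List (List Int)) (matPrecios : List Int) (c : Int) : Int :=
  (matVentas.zip matPrecios).foldl (fun s rp => s + PySem.List.pyGetD rp.1 c 0 * rp.2) 0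

def calcDiaMayorVentas_alt (matVentas : List (List Int)) (matPrecios : List Int) : Int :=
  let colum : Int := ((PySem.List.pyGetD matVentas 0 []).length : Int)
  let best :=
    (PySem.List.pyRange 1 colum 1).foldl
      (fun (b : Int × Int) c =>
        let t := pvColTotal matVentas matPrecios c
        if b.2 < t then (c, t) else b)
      (0, pvColTotal matVentas matPrecios 0)
  best.1

-- ===== PRECONDITION & SPEC =====
-- Pre_ excludes exactly the inputs where A raises: empty matVentas (IndexError on matVentas[0]),
-- zero columns (ValueError from max([])), a row shorter than the first row (IndexError),
-- and matPrecios shorter than matVentas (IndexError).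
def Pre_calcDiaMayorVentas (matVentas : List (List Int)) (matPrecios : List Int) : Prop :=
  matVentas ≠ [] ∧ 0 < (matVentas.headD []).length ∧
  (∀ row ∈ matVentas, (matVentas.headD []).length ≤ row.length) ∧
  matVentas.length ≤ matPrecios.length
instance (matVentas : List (List Int)) (matPrecios : List Int) : Decidable (Pre_calcDiaMayorVentas matVentas matPrecios) := by unfold Pre_calcDiaMayorVentas; infer_instance

def pvWitness_calcDiaMayorVentas : List (List Int) × List Int := ([[1, 2], [3, 1]], [2, 3])

def Spec_calcDiaMayorVentas (matVentas : List (List Int)) (matPrecios : List Int) (out : Int) : Prop := out = calcDiaMayorVentas_alt matVentas matPrecios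
instance (matVentas : List (List Int)) (matPrecios : List Int) (out : Int) : Decidable (Spec_calcDiaMayorVentas matVentas matPrecios out) := by unfold Spec_calcDiaMayorVentas; infer_instance

-- ===== CLAIM (what is proved, stated in full; the proofs are below) =====
def Claim_equal_calcDiaMayorVentas : Prop := ∀ (matVentas : List (List Int)) (matPrecios : List Int), Dom_calcDiaMayorVentas matVentas matPrecios → Pre_calcDiaMayorVentas matVentas matPrecios → Spec_calcDiaMayorVentas matVentas matPrecios (calcDiaMayorVentas matVentas matPrecios)

-- ===== LEMMAS AND PROOFS =====

-- inner fold of A: one row added into the accumulator list, elementwise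
theorem pv_inner (row : List Int) (p : Int) :
    ∀ (m : Nat) (lst : List Int), m ≤ lst.length →
      ((PySem.List.pyRange 0 (m : Int) 1).foldl
          (fun lst c => PySem.List.pySetD lst c
            (PySem.List.pyGetD lst c 0 + PySem.List.pyGetD row c 0 * p)) lst).length = lst.length ∧
      ∀ j (hj : j < lst.length),
        ((PySem.List.pyRange 0 (m : Int) 1).foldl
          (fun lst c => PySem.List.pySetD lst c
            (PySem.List.pyGetD lst c 0 + PySem.List.pyGetD row c 0 * p)) lst)[j]?
        = some (if j < m then lst[j] + PySem.List.pyGetD row (j : Int) 0 * p else lst[j]) := by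
  intro m
  induction m with
  | zero =>
    intro lst h
    simp [PySem.List.pyRange_one_eq_nil]
  | succ m ih =>
    intro lst h
    have hm : m ≤ lst.length := Nat.le_of_succ_le h
    obtain ⟨hlen, helt⟩ := ih lst hm
    have hsplit : PySem.List.pyRange 0 ((m : Int) + 1) 1
        = PySem.List.pyRange 0 (m : Int) 1 ++ [(m : Int)] :=
      PySem.List.pyRange_one_succ_right (by positivity)
    set F := (fun (lst : List Int) (c : Int) => PySem.List.pySetD lst c
            (PySem.List.pyGetD lst c 0 + PySem.List.pyGetD row c 0 * p)) with hF
    set r := (PySem.List.pyRange 0 (m : Int) 1).foldl F lst with hr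
    have hcast : ((m + 1 : Nat) : Int) = (m : Int) + 1 := by push_cast; ring
    rw [hcast, hsplit, List.foldl_append]
    have hmr : m < r.length := by omega
    have hstep : F r (m : Int) = r.set m (r[m] + PySem.List.pyGetD row (m : Int) 0 * p) := by
      simp [hF, PySem.List.pySetD_natCast, PySem.List.pyGetD_natCast, List.getD_eq_getElem?_getD,
        List.getElem?_eq_getElem hmr]
    rw [List.foldl_cons, List.foldl_nil, hstep]
    constructor
    · simp [hlen]
    · intro j hj
      have hrm : r[m] = lst[m] := by
        have h2 := helt m (by omega)
        rw [List.getElem?_eq_getElem hmr] at h2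
        simpa using h2
      by_cases hje : j = m
      · subst hje
        simp [hmr, hrm]
        rfl
      · have hne : m ≠ j := by omega
        rw [List.getElem?_set, if_neg hne, helt j hj]
        simp [show (j < m) ↔ (j < m + 1) by omega]

-- outer fold of A: after k rows, entry j holds the partial weighted column total
theorem pv_outer (matVentas : List (List Int)) (matPrecios : List Int) (n : Nat)
    (hrow : ∀ row ∈ matVentas, n ≤ row.length)
    (hlen : matVentas.length ≤ matPrecios.length) :
    ∀ (k : Nat), k ≤ matVentas.length →
      ((PySem.List.pyRange 0 (k : Int) 1).foldl (fun lst f =>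
        (PySem.List.pyRange 0 (n : Int) 1).foldl (fun lst c =>
          PySem.List.pySetD lst c
            (PySem.List.pyGetD lst c 0 +
              PySem.List.pyGetD (PySem.List.pyGetD matVentas f []) c 0 *
                PySem.List.pyGetD matPrecios f 0)) lst) (List.replicate n 0)).length = n ∧
      ∀ j (hj : j < n),
        ((PySem.List.pyRange 0 (k : Int) 1).foldl (fun lst f =>
          (PySem.List.pyRange 0 (n : Int) 1).foldl (fun lst c =>
            PySem.List.pySetD lst c
              (PySem.List.pyGetD lst c 0 +
                PySem.List.pyGetD (PySem.List.pyGetD matVentas f []) c 0 *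
                  PySem.List.pyGetD matPrecios f 0)) lst) (List.replicate n 0))[j]?
        = some (((matVentas.zip matPrecios).take k).foldl
            (fun s rp => s + PySem.List.pyGetD rp.1 (j : Int) 0 * rp.2) 0) := by
  intro k
  induction k with
  | zero =>
    intro _
    refine ⟨by simp [PySem.List.pyRange_one_eq_nil], ?_⟩
    intro j hj
    simp [PySem.List.pyRange_one_eq_nil, hj]
  | succ k ih =>
    intro hk
    have hk' : k ≤ matVentas.length := Nat.le_of_succ_le hk
    obtain ⟨hlen1, helt1⟩ := ih hk'
    have hsplit : PySem.List.pyRange 0 ((k : Int) + 1) 1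
        = PySem.List.pyRange 0 (k : Int) 1 ++ [(k : Int)] :=
      PySem.List.pyRange_one_succ_right (by positivity)
    have hcast : ((k + 1 : Nat) : Int) = (k : Int) + 1 := by push_cast; ring
    rw [hcast, hsplit, List.foldl_append, List.foldl_cons, List.foldl_nil]
    set G := (fun (lst : List Int) (f : Int) =>
      (PySem.List.pyRange 0 (n : Int) 1).foldl (fun lst c =>
        PySem.List.pySetD lst c
          (PySem.List.pyGetD lst c 0 +
            PySem.List.pyGetD (PySem.List.pyGetD matVentas f []) c 0 *
              PySem.List.pyGetD matPrecios f 0)) lst) with hG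
    set r := (PySem.List.pyRange 0 (k : Int) 1).foldl G (List.replicate n 0) with hr
    have hkv : k < matVentas.length := hk
    have hkp : k < matPrecios.length := by omega
    have hrowk : PySem.List.pyGetD matVentas (k : Int) [] = matVentas[k] := by
      simp [PySem.List.pyGetD_natCast, List.getD_eq_getElem?_getD, List.getElem?_eq_getElem hkv]
    have hpk : PySem.List.pyGetD matPrecios (k : Int) 0 = matPrecios[k] := by
      simp [PySem.List.pyGetD_natCast, List.getD_eq_getElem?_getD, List.getElem?_eq_getElem hkp]
    obtain ⟨ilen, ielt⟩ := pv_inner (matVentas[k]) (matPrecios[k]) n r (by omega)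
    simp only [hrowk, hpk]
    constructor
    · rw [ilen, hlen1]
    · intro j hj
      have hjr : j < r.length := by omega
      rw [ielt j hjr]
      have hjv : PySem.List.pyGetD (matVentas[k]) (j : Int) 0 = matVentas[k][j]'(by
          exact lt_of_lt_of_le hj (hrow _ (List.getElem_mem hkv))) := by
        have hjk : j < (matVentas[k]).length := lt_of_lt_of_le hj (hrow _ (List.getElem_mem hkv))
        simp [PySem.List.pyGetD_natCast, List.getD_eq_getElem?_getD, List.getElem?_eq_getElem hjk]
      have hr1 : r[j]'hjr = ((matVentas.zip matPrecios).take k).foldl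
          (fun s rp => s + PySem.List.pyGetD rp.1 (j : Int) 0 * rp.2) 0 := by
        have h2 := helt1 j hj
        rw [List.getElem?_eq_getElem hjr] at h2
        simpa using h2
      have hzlen : (matVentas.zip matPrecios).length = matVentas.length := by
        simp [List.length_zip]; omega
      have hktake : (matVentas.zip matPrecios).take (k + 1)
          = (matVentas.zip matPrecios).take k ++ [(matVentas[k], matPrecios[k])] := by
        rw [List.take_add_one]
        have : (matVentas.zip matPrecios)[k]? = some (matVentas[k], matPrecios[k]) := by
          rw [List.getElem?_eq_getElem (by omega)]
          simp [List.getElem_zip]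
        simp [this]
      rw [hktake, List.foldl_append, List.foldl_cons, List.foldl_nil]
      simp [hj, hr1, hjv]

-- running-argmax invariant for B's fold: first position of the maximum so far
theorem pv_bfold (g : Int → Int) :
    ∀ (m : Nat),
      ∃ pos : Nat,
        (PySem.List.pyRange 1 (m : Int) 1).foldl
            (fun (b : Int × Int) c => if b.2 < g c then (c, g c) else b) (0, g 0)
          = ((pos : Int), g (pos : Int)) ∧
        pos < max 1 m ∧
        (∀ j : Nat, j < m → g (j : Int) ≤ g (pos : Int)) ∧
        (∀ j : Nat, j < pos → g (j : Int) < g (pos : Int)) := by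
  intro m
  induction m with
  | zero =>
    refine ⟨0, ?_, by omega, by omega, by omega⟩
    simp [PySem.List.pyRange_one_eq_nil]
  | succ m ih =>
    obtain ⟨pos, hfold, hlt, hmax, hfirst⟩ := ih
    by_cases hm : m = 0
    · subst hm
      refine ⟨0, ?_, by omega, ?_, by omega⟩
      · simp [PySem.List.pyRange_one_eq_nil]
      · intro j hj
        interval_cases j
        simp
    · have hm1 : 1 ≤ m := by omega
      have hcast : ((m + 1 : Nat) : Int) = (m : Int) + 1 := by push_cast; ring
      have hsplit : PySem.List.pyRange 1 ((m : Int) + 1) 1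
          = PySem.List.pyRange 1 (m : Int) 1 ++ [(m : Int)] :=
        PySem.List.pyRange_one_succ_right (by exact_mod_cast hm1)
      rw [hcast, hsplit, List.foldl_append, List.foldl_cons, List.foldl_nil, hfold]
      by_cases hc : g (pos : Int) < g (m : Int)
      · refine ⟨m, ?_, by omega, ?_, ?_⟩
        · simp [hc]
        · intro j hj
          rcases Nat.lt_succ_iff_lt_or_eq.mp hj with h | h
          · exact le_of_lt (lt_of_le_of_lt (hmax j h) hc)
          · subst h; exact le_refl _
        · intro j hj
          exact lt_of_le_of_lt (hmax j hj) hc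
      · refine ⟨pos, ?_, by omega, ?_, hfirst⟩
        · simp [hc]
        · intro j hj
          rcases Nat.lt_succ_iff_lt_or_eq.mp hj with h | h
          · exact hmax j h
          · subst h; exact not_lt.mp hc

-- A's tail: max then index on a list of column totals picks the first argmax
theorem pv_max_index (g : Int → Int) (L : List Int) (n : Nat) (hn : 1 ≤ n)
    (hL : L.length = n) (helt : ∀ j (hj : j < n), L[j]'(by omega) = g (j : Int))
    (pos : Nat) (hpos : pos < n)
    (hmax : ∀ j : Nat, j < n → g (j : Int) ≤ g (pos : Int))
    (hfirst : ∀ j : Nat, j < pos → g (j : Int) < g (pos : Int)) :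
    (PySem.List.max? L (fun y => y)).getD 0 = g (pos : Int) ∧
    PySem.List.index? L (g (pos : Int)) = some pos := by
  have hne : L ≠ [] := by intro h; rw [h] at hL; simp at hL; omega
  have hposmem : g (pos : Int) ∈ L := by
    rw [← helt pos hpos]; exact List.getElem_mem (by omega)
  constructor
  · cases h : PySem.List.max? L (fun y => y) with
    | none => exact absurd (((PySem.List.max?_eq_none_iff L (fun y => y)).mp h)) hne
    | some v =>
      have hvmem : v ∈ L := PySem.List.max?_mem h
      obtain ⟨i, hi, hiv⟩ := List.mem_iff_getElem.mp hvmem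
      have hin : i < n := by omega
      have h1 : v ≤ g (pos : Int) := by
        rw [← hiv, helt i hin]; exact hmax i hin
      have h2 : g (pos : Int) ≤ v := PySem.List.max?_isMax h _ hposmem
      simp [le_antisymm h1 h2]
  · rw [PySem.List.index?_eq_some_iff]
    refine ⟨L.take pos, L.drop (pos + 1), ?_, ?_, ?_⟩
    · conv_lhs => rw [← List.take_append_drop pos L]
      rw [List.drop_eq_getElem_cons (by omega), helt pos hpos]
    · exact List.length_take_of_le (by omega)
    · intro hm
      obtain ⟨j, hj, hjv⟩ := List.mem_iff_getElem.mp hm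
      have hjp : j < pos := by
        have := List.length_take_of_le (show pos ≤ L.length by omega)
        omega
      rw [List.getElem_take, helt j (by omega)] at hjv
      exact absurd hjv (ne_of_lt (hfirst j hjp))


-- ===== VERDICT (by name: the statement is the Claim_ definition above) =====
theorem calcDiaMayorVentas_spec : Claim_equal_calcDiaMayorVentas := by
  intro mv mp _ hpre
  obtain ⟨hne, hcolpos, hrow, hlen⟩ := hpre
  unfold Spec_calcDiaMayorVentas calcDiaMayorVentas calcDiaMayorVentas_alt
  set n : Nat := (mv.headD []).length with hn
  have hhead : PySem.List.pyGetD mv 0 [] = mv.headD [] := by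
    cases mv with
    | nil => exact absurd rfl hne
    | cons x xs => simp [PySem.List.pyGetD_zero_cons]
  simp only [hhead, ← hn, Int.toNat_natCast]
  -- characterize A's accumulated list
  obtain ⟨hL, heltq⟩ := pv_outer mv mp n hrow hlen mv.length le_rfl
  set L := (PySem.List.pyRange 0 ((mv.length : Nat) : Int) 1).foldl (fun lst f =>
      (PySem.List.pyRange 0 ((n : Nat) : Int) 1).foldl (fun lst c =>
        PySem.List.pySetD lst c
          (PySem.List.pyGetD lst c 0 +
            PySem.List.pyGetD (PySem.List.pyGetD mv f []) c 0 *
              PySem.List.pyGetD mp f 0)) lst) (List.replicate n 0) with hLdef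
  have hzip : (mv.zip mp).take mv.length = mv.zip mp := by
    apply List.take_of_length_le
    simp [List.length_zip]
  have helt : ∀ j (hj : j < n), L[j]'(by omega) = pvColTotal mv mp (j : Int) := by
    intro j hj
    have h2 := heltq j hj
    rw [List.getElem?_eq_getElem (by omega), hzip] at h2
    simpa [pvColTotal] using h2
  have hn1 : 1 ≤ n := hcolpos
  -- characterize B's running best
  obtain ⟨pos, hfold, hlt, hmax, hfirst⟩ := pv_bfold (pvColTotal mv mp) n
  have hposn : pos < n := by omega
  obtain ⟨hmaxv, hidx⟩ := pv_max_index (pvColTotal mv mp) L n hn1 hL helt pos hposn hmax hfirst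
  rw [hmaxv, hidx, hfold]
  simp
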